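-- pv_equiv track=rewrite | github.com/mark-ni/competitive-programming | codeforces/19.12.14.3.py | getdb
-- ===== SOURCE A (Python) =====
-- def getdb(s, x):
--     l = 1
--     length = len(s)
--     newS = s + [0] * (3*x - length)
--     while length < x and l <= x:
--         #newS = newS[0:l] + newS[l - 1] * newS[l:]
--         i = length - l
--         j = length
--         for k in range(newS[l - 1] - 1):
--             newS[j:j + i] = newS[l:l + i]
--             j += i
--             length += i
--         l += 1
--     return newS[0:length]
-- ===== SOURCE B (Python) =====
-- def _lookup(s, steps, i):
--     # map output index i back through the expansion steps to an index into s
--     for (l, m, f) in reversed(steps):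
--         if i >= l:
--             i = l + (i - l) % (m - l)
--     return s[i]
--
--
-- def getdb(s, x):
--     # Phase 1: simulate only the LENGTHS, recording each effective expansion
--     # step as (position l, length m before the step, factor f); no list is built.
--     steps = []
--     m = len(s)
--     l = 1
--     while m < x and l <= x:
--         f = _lookup(s, steps, l - 1) if l - 1 < m else 0
--         if f > 1 and l < m:
--             steps.append((l, m, f))
--             m = l + f * (m - l)
--         l += 1
--     # Phase 2: reconstruct every output element directly from s by mapping its
--     # index backwards through the recorded steps (decode-at-index technique).
--     return [_lookup(s, steps, i) for i in range(m)]
-- ===== Notes on version B (the rewrite author's own statement) =====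
-- stated objective: alternative
-- what changed: B never materialises any intermediate expanded list: a first pass simulates only the lengths, recording each effective expansion step as (position, length-before, factor), and then every output element (and every factor read during the first pass) is reconstructed directly from the original s by mapping its index backwards through the recorded steps with modular arithmetic (the classic decode-at-index technique), instead of A's forward block-copying into a zero-padded buffer.
import Mathlib
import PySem

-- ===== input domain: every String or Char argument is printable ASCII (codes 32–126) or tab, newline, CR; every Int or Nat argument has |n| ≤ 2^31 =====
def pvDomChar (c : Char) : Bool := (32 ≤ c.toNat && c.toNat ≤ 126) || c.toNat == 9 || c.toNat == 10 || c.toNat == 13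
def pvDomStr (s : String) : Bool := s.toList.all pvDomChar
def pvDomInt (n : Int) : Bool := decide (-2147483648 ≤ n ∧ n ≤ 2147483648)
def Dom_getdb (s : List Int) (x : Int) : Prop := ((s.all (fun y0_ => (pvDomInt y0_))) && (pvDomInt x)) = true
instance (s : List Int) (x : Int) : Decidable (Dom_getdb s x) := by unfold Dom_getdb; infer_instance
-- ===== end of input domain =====

-- B replaces A's forward block-copying into a zero-padded buffer by a length-only pass that
-- records the expansion steps, plus per-element backward index mapping into the original s
-- (decode-at-index); objective: alternative. Neither version mutates its arguments.

-- ===== PORT A =====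

-- Python slice assignment `xs[a:b] = src` (bounds normalised exactly as Python slices do).
def pvSetSlice (xs : List Int) (a b : Int) (src : List Int) : List Int :=
  xs.take (PySem.List.clampIdx xs.length a) ++ src ++
    xs.drop (max (PySem.List.clampIdx xs.length a) (PySem.List.clampIdx xs.length b))

-- the inner `for k in range(newS[l-1] - 1)` loop of A: state is (newS, j, length); l and i are fixed.
def getdbCopy (l i : Int) : Nat → List Int × Int × Int → List Int × Int × Int
  | 0, st => st
  | k + 1, (newS, j, length) =>
      getdbCopy l i k
        (pvSetSlice newS j (j + i) (PySem.List.slice newS (some l) (some (l + i))), j + i, length + i)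

-- A's outer while loop, with fuel = the remaining iteration count (l goes up by 1 per pass
-- and the loop stops once l > x, so (x + 1 - l).toNat iterations remain: at fuel 0 the
-- condition l ≤ x is false and the loop exits anyway). `newS[l-1]` is in range on every
-- state this port runs on (len(newS) ≥ 3*x ≥ l whenever the loop condition holds), so
-- `(pyGet? …).getD 0` reads exactly what Python reads.
def getdbLoop (x : Int) : Nat → List Int → Int → Int → List Int × Int
  | 0, newS, length, _ => (newS, length)
  | n + 1, newS, length, l =>
    if length < x ∧ l ≤ x then
      let st := getdbCopy l (length - l)
        (((PySem.List.pyGet? newS (l - 1)).getD 0) - 1).toNat (newS, length, length)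
      getdbLoop x n st.1 st.2.2 (l + 1)
    else (newS, length)

def getdb (s : List Int) (x : Int) : List Int :=
  let length : Int := s.length
  let newS := s ++ List.replicate (3 * x - length).toNat 0
  let r := getdbLoop x x.toNat newS length 1
  PySem.List.slice r.1 (some 0) (some r.2)

-- ===== PORT B =====

-- one recorded step (l, m, f) maps an index of the post-step list to an index of the pre-step list
def lookStep (st : Int × Int × Int) (i : Int) : Int :=
  if st.1 ≤ i then st.1 + PySem.Int.mod (i - st.1) (st.2.1 - st.1) else i

-- _lookup: iterate over reversed(steps) (= foldr), then read s[i];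
-- the final index is always in range on every state B reaches (proved below), so
-- `(pyGet? …).getD 0` reads exactly what Python reads.
def lookB (s : List Int) (steps : List (Int × Int × Int)) (i : Int) : Int :=
  (PySem.List.pyGet? s (steps.foldr lookStep i)).getD 0

-- phase 1: simulate only the lengths, recording effective expansion steps
-- (fuel = remaining iterations exactly as in getdbLoop: at fuel 0 the condition is false)
def altLoop (s : List Int) (x : Int) : Nat → List (Int × Int × Int) → Int → Int →
    List (Int × Int × Int) × Int
  | 0, steps, m, _ => (steps, m)
  | n + 1, steps, m, l =>
    if m < x ∧ l ≤ x then
      let f := if l - 1 < m then lookB s steps (l - 1) else 0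
      if f > 1 ∧ l < m then altLoop s x n (steps ++ [(l, m, f)]) (l + f * (m - l)) (l + 1)
      else altLoop s x n steps m (l + 1)
    else (steps, m)

def getdb_alt (s : List Int) (x : Int) : List Int :=
  let r := altLoop s x x.toNat [] (s.length : Int) 1
  (PySem.List.pyRange 0 r.2 1).map (lookB s r.1)

-- ===== PRECONDITION & SPEC =====
def Spec_getdb (s : List Int) (x : Int) (out : List Int) : Prop := out = getdb_alt s x
instance (s : List Int) (x : Int) (out : List Int) : Decidable (Spec_getdb s x out) := by unfold Spec_getdb; infer_instance

-- ===== CLAIM (what is proved, stated in full; the proofs are below) =====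
def Claim_equal_getdb : Prop := ∀ (s : List Int) (x : Int), Dom_getdb s x → Spec_getdb s x (getdb s x)

-- ===== LEMMAS AND PROOFS =====

-- Bridge between the two ports: the slice-and-replicate loop (one expansion per position
-- on an exact-length list). A is proved equal to it below (copy_agree/factor_agree/loop_agree),
-- and B's staged reconstruction is proved equal to it too (step_invariant/mid_alt).
def midLoop (s0 : List Int) (x : Int) : Nat → List Int → Int → List Int
  | 0, newS, _ => newS
  | n + 1, newS, l =>
    if (newS.length : Int) < x ∧ l ≤ x then
      let factor := if l - 1 < (newS.length : Int) then (PySem.List.pyGet? newS (l - 1)).getD 0 else 0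
      let newS' := if factor > 1 then
          PySem.List.slice newS none (some l) ++
            (List.replicate factor.toNat (PySem.List.slice newS (some l) none)).flatten
        else newS
      midLoop s0 x n newS' (l + 1)
    else newS

lemma drop_min_length {α : Type} (xs : List α) (m : Nat) : xs.drop (min m xs.length) = xs.drop m := by
  rcases le_total m xs.length with h | h
  · rw [min_eq_left h]
  · rw [min_eq_right h, List.drop_of_length_le h, List.drop_of_length_le (le_refl _)]

-- Invariant of A's inner loop: with `nB ++ C` already produced (j = length = its length) and
-- only zeros behind it, each pass appends one more copy of the block nB[l:] in place of zeros.
lemma copy_agree (l : Int) (hl : 1 ≤ l) (nB : List Int) (hlen : l ≤ (nB.length : Int)) :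
    ∀ (k : Nat) (C zs : List Int), (∀ z ∈ zs, z = 0) →
      getdbCopy l ((nB.length : Int) - l) k
          (nB ++ C ++ zs, ((nB.length + C.length : Nat) : Int), ((nB.length + C.length : Nat) : Int))
        = (nB ++ C ++ (List.replicate k (nB.drop l.toNat)).flatten
             ++ zs.drop (k * ((nB.length : Int) - l).toNat),
           ((nB.length + C.length : Nat) : Int) + k * ((nB.length : Int) - l),
           ((nB.length + C.length : Nat) : Int) + k * ((nB.length : Int) - l)) := by
  set i : Int := (nB.length : Int) - l with hi
  have hi0 : 0 ≤ i := by omega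
  set iN : Nat := i.toNat with hiN
  have hiNi : (iN : Int) = i := Int.toNat_of_nonneg hi0
  have hblock : (nB.drop l.toNat).length = iN := by
    simp [List.length_drop]; omega
  intro k
  induction k with
  | zero => intro C zs hz; simp [getdbCopy]
  | succ k ih =>
    intro C zs hz
    show getdbCopy l i k
        (pvSetSlice (nB ++ C ++ zs) _ _ (PySem.List.slice (nB ++ C ++ zs) (some l) (some (l + i))), _, _) = _
    have hsrc : PySem.List.slice (nB ++ C ++ zs) (some l) (some (l + i)) = nB.drop l.toNat := by
      rw [PySem.List.slice_toNat _ (by omega) (by omega)]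
      have h1 : (l + i).toNat - l.toNat = iN := by omega
      rw [h1, List.append_assoc, List.drop_append_of_le_length (by omega)]
      rw [List.take_append_of_le_length (by omega), List.take_of_length_le (by omega)]
    have htake : List.take (nB.length + C.length) (nB ++ C ++ zs) = nB ++ C := by
      have h2 : nB.length + C.length = (nB ++ C).length := by simp
      rw [h2, List.take_left]
    have hdropfar : List.drop (nB.length + C.length + iN) (nB ++ C ++ zs) = List.drop iN zs := by
      rw [List.drop_append]
      rw [List.drop_of_length_le (by simp)]
      simp
    have hset : pvSetSlice (nB ++ C ++ zs) ((nB.length + C.length : Nat) : Int)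
        (((nB.length + C.length : Nat) : Int) + i) (nB.drop l.toNat)
        = nB ++ C ++ nB.drop l.toNat ++ zs.drop iN := by
      unfold pvSetSlice
      have hc1 : PySem.List.clampIdx (nB ++ C ++ zs).length ((nB.length + C.length : Nat) : Int)
          = nB.length + C.length := by
        rw [PySem.List.clampIdx_natCast]; simp
      have hcast : ((nB.length + C.length : Nat) : Int) + i = ((nB.length + C.length + iN : Nat) : Int) := by
        push_cast; omega
      rw [hc1, hcast, PySem.List.clampIdx_natCast]
      have hmax : max (nB.length + C.length) (min (nB.length + C.length + iN) (nB ++ C ++ zs).length)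
          = min (nB.length + C.length + iN) (nB ++ C ++ zs).length := by
        simp only [List.length_append]
        omega
      rw [hmax, drop_min_length, htake, hdropfar]
    rw [hsrc, hset]
    have hzz : ∀ z ∈ zs.drop iN, z = 0 := fun z hz' => hz z (List.mem_of_mem_drop hz')
    have := ih (C ++ nB.drop l.toNat) (zs.drop iN) hzz
    rw [← List.append_assoc] at this
    have hlen2 : ((nB.length + (C ++ nB.drop l.toNat).length : Nat) : Int)
        = ((nB.length + C.length : Nat) : Int) + i := by
      simp [List.length_append, hblock]; omega
    rw [hlen2] at this
    rw [this]
    have hnum : ((nB.length + C.length : Nat) : Int) + i + (k : Int) * i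
        = ((nB.length + C.length : Nat) : Int) + ((k + 1 : Nat) : Int) * i := by push_cast; ring
    have hdrop2 : List.drop (k * iN) (List.drop iN zs) = List.drop ((k + 1) * iN) zs := by
      rw [List.drop_drop]; congr 1; ring
    rw [hnum, hdrop2]
    simp [List.replicate_succ, List.append_assoc]

-- A reads `newS[l-1]` through the zero padding; midLoop guards the read and uses 0 past the end.
lemma factor_agree (l : Int) (hl : 1 ≤ l) (nB zs : List Int) (hz : ∀ z ∈ zs, z = 0) :
    (PySem.List.pyGet? (nB ++ zs) (l - 1)).getD 0
      = (if l - 1 < (nB.length : Int) then (PySem.List.pyGet? nB (l - 1)).getD 0 else 0) := by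
  rw [PySem.List.pyGet?_of_nonneg (nB ++ zs) (by omega), PySem.List.pyGet?_of_nonneg nB (by omega)]
  by_cases h : (l - 1 : Int) < (nB.length : Int)
  · rw [if_pos h, List.getElem?_append_left (by omega)]
  · rw [if_neg h, List.getElem?_append_right (by omega)]
    rcases h2 : zs[(l - 1).toNat - nB.length]? with _ | z
    · rfl
    · have hz2 : z ∈ zs := List.mem_of_getElem? h2
      simp [hz z hz2]

-- Outer-loop invariant: A's state is midLoop's list followed by zeros, with A's length counter
-- equal to the length of midLoop's list.
lemma loop_agree (s0 : List Int) (x : Int) :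
    ∀ (n : Nat) (l : Int) (nB zs : List Int), (x + 1 - l).toNat ≤ n → 1 ≤ l →
      (∀ z ∈ zs, z = 0) →
      ∃ zs', (∀ z ∈ zs', z = 0) ∧
        getdbLoop x n (nB ++ zs) (nB.length : Int) l
          = (midLoop s0 x n nB l ++ zs', ((midLoop s0 x n nB l).length : Int)) := by
  intro n
  induction n with
  | zero =>
    intro l nB zs hn hl hz
    exact ⟨zs, hz, rfl⟩
  | succ n ih =>
    intro l nB zs hn hl hz
    rw [getdbLoop, midLoop]
    by_cases hc : (nB.length : Int) < x ∧ l ≤ x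
    · rw [if_pos hc, if_pos hc]
      simp only [factor_agree l hl nB zs hz]
      set f : Int := if l - 1 < (nB.length : Int) then (PySem.List.pyGet? nB (l - 1)).getD 0 else 0 with hf
      by_cases hf1 : f > 1
      · have hfl : l ≤ (nB.length : Int) := by
          by_contra hcon
          rw [if_neg (by omega)] at hf
          omega
        have hcopy := copy_agree l hl nB hfl (f - 1).toNat [] zs hz
        simp only [List.append_nil, List.length_nil, Nat.add_zero] at hcopy
        rw [if_pos hf1, hcopy]
        set block := nB.drop l.toNat with hb
        have hblock : (block.length : Int) = (nB.length : Int) - l := by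
          simp [hb, List.length_drop]; omega
        have hBnew : PySem.List.slice nB none (some l) ++
            (List.replicate f.toNat (PySem.List.slice nB (some l) none)).flatten
            = nB ++ (List.replicate (f - 1).toNat block).flatten := by
          rw [PySem.List.slice_to nB (by omega), PySem.List.slice_from nB (by omega)]
          have hfn : f.toNat = (f - 1).toNat + 1 := by omega
          rw [hfn, List.replicate_succ, List.flatten_cons, ← List.append_assoc,
            List.take_append_drop]
        have hlen3 : ((nB.length : Int)) + ((f - 1).toNat : Int) * ((nB.length : Int) - l)
            = (((nB ++ (List.replicate (f - 1).toNat block).flatten).length : Nat) : Int) := by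
          simp [List.length_append, List.length_flatten, List.map_replicate, List.sum_replicate,
            smul_eq_mul]
          rw [hblock]
          exact Or.inl rfl
        obtain ⟨zs', hz', heq⟩ := ih (l + 1) (nB ++ (List.replicate (f - 1).toNat block).flatten)
          (zs.drop ((f - 1).toNat * ((nB.length : Int) - l).toNat))
          (by omega) (by omega) (fun z hz' => hz z (List.mem_of_mem_drop hz'))
        rw [← hlen3] at heq
        refine ⟨zs', hz', ?_⟩
        rw [hBnew]
        exact heq
      · rw [if_neg hf1]
        have hzero : (f - 1).toNat = 0 := by omega
        rw [hzero]
        exact ih (l + 1) nB zs (by omega) (by omega) hz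
    · rw [if_neg hc, if_neg hc]
      exact ⟨zs, hz, rfl⟩

-- appending one recorded step composes one index-mapping pass in front of the read
lemma lookB_append_singleton (s : List Int) (steps : List (Int × Int × Int))
    (st : Int × Int × Int) (i : Int) :
    lookB s (steps ++ [st]) i = lookB s steps (lookStep st i) := by
  unfold lookB
  rw [List.foldr_append]
  rfl

lemma getElem?_flatten_replicate {α : Type} (xs : List α) :
    ∀ (k j : Nat), j < k * xs.length →
      (List.replicate k xs).flatten[j]? = xs[j % xs.length]? := by
  intro k
  induction k with
  | zero => intro j hj; omega
  | succ k ih =>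
    intro j hj
    rw [List.replicate_succ, List.flatten_cons]
    by_cases h : j < xs.length
    · rw [List.getElem?_append_left h, Nat.mod_eq_of_lt h]
    · replace h : xs.length ≤ j := Nat.le_of_not_lt h
      rw [List.getElem?_append_right h]
      have hj' : j - xs.length < k * xs.length := by
        have h2 : (k + 1) * xs.length = k * xs.length + xs.length := by ring
        omega
      rw [ih (j - xs.length) hj']
      congr 1
      conv_rhs => rw [← Nat.sub_add_cancel h]
      rw [Nat.add_mod_right]

-- every list indexed by a lookup function equals the map of that function over its range
lemma eq_map_range (nB : List Int) (g : Nat → Int)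
    (h : ∀ k : Nat, k < nB.length → nB[k]? = some (g k)) :
    nB = (List.range nB.length).map g := by
  apply List.ext_getElem?
  intro k
  by_cases hk : k < nB.length
  · rw [h k hk]
    simp [List.getElem?_map, List.getElem?_range hk]
  · rw [List.getElem?_eq_none (by omega), List.getElem?_eq_none (by simpa using by omega)]

-- one slice-and-replicate expansion preserves the "every element is lookB of its index" invariant
lemma step_invariant (s : List Int) (steps : List (Int × Int × Int)) (l f : Int) (nB : List Int)
    (hl : 1 ≤ l) (hlm : l < (nB.length : Int))
    (hinv : ∀ k : Nat, k < nB.length → nB[k]? = some (lookB s steps (k : Int))) :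
    ∀ k : Nat, k < (nB.take l.toNat ++ (List.replicate f.toNat (nB.drop l.toNat)).flatten).length →
      (nB.take l.toNat ++ (List.replicate f.toNat (nB.drop l.toNat)).flatten)[k]?
        = some (lookB s (steps ++ [(l, (nB.length : Int), f)]) (k : Int)) := by
  intro k hk
  set lN : Nat := l.toNat with hlN
  have hlNl : (lN : Int) = l := Int.toNat_of_nonneg (by omega)
  have hlNlen : lN < nB.length := by omega
  set blen : Nat := nB.length - lN with hblen
  have hblen0 : 0 < blen := by omega
  have hdlen : (nB.drop lN).length = blen := by rw [List.length_drop]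
  have htlen : (nB.take lN).length = lN := by rw [List.length_take]; omega
  rw [lookB_append_singleton]
  by_cases hkl : k < lN
  · have hstep : lookStep (l, (nB.length : Int), f) (k : Int) = (k : Int) := by
      unfold lookStep
      rw [if_neg (by simp only []; omega)]
    rw [hstep, List.getElem?_append_left (by omega), List.getElem?_take_of_lt hkl]
    exact hinv k (by omega)
  · replace hkl : lN ≤ k := Nat.le_of_not_lt hkl
    have hkflat : k - lN < f.toNat * (nB.drop lN).length := by
      rw [List.length_append, htlen, List.length_flatten, List.map_replicate, hdlen,
        List.sum_replicate, smul_eq_mul] at hk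
      rw [hdlen]
      omega
    have hmod : (k - lN) % blen < blen := Nat.mod_lt _ hblen0
    have hstep : lookStep (l, (nB.length : Int), f) (k : Int)
        = ((lN + (k - lN) % blen : Nat) : Int) := by
      unfold lookStep
      rw [if_pos (by simp only []; omega)]
      simp only []
      rw [PySem.Int.mod_eq_emod_of_pos (by omega)]
      have h1 : (k : Int) - l = ((k - lN : Nat) : Int) := by omega
      have h2 : (nB.length : Int) - l = ((blen : Nat) : Int) := by omega
      rw [h1, h2, ← Int.natCast_emod]
      push_cast
      omega
    have e1 : (nB.take lN ++ (List.replicate f.toNat (nB.drop lN)).flatten)[k]?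
        = ((List.replicate f.toNat (nB.drop lN)).flatten)[k - (nB.take lN).length]? :=
      List.getElem?_append_right (by omega)
    have e2 : ((List.replicate f.toNat (nB.drop lN)).flatten)[k - lN]?
        = (nB.drop lN)[(k - lN) % (nB.drop lN).length]? :=
      getElem?_flatten_replicate _ _ _ hkflat
    rw [e1, htlen, e2, hdlen, List.getElem?_drop, hstep]
    exact hinv (lN + (k - lN) % blen) (by omega)

-- main bridge: the slice-and-replicate loop computes exactly B's staged reconstruction
lemma mid_alt (s : List Int) (x : Int) :
    ∀ (n : Nat) (l : Int) (steps : List (Int × Int × Int)) (nB : List Int),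
      (x + 1 - l).toNat ≤ n → 1 ≤ l →
      (∀ k : Nat, k < nB.length → nB[k]? = some (lookB s steps (k : Int))) →
      midLoop s x n nB l
        = (List.range (altLoop s x n steps (nB.length : Int) l).2.toNat).map
            (fun (k : Nat) => lookB s (altLoop s x n steps (nB.length : Int) l).1 (k : Int)) := by
  intro n
  induction n with
  | zero =>
    intro l steps nB hn hl hinv
    exact eq_map_range nB _ hinv
  | succ n ih =>
    intro l steps nB hn hl hinv
    rw [midLoop, altLoop]
    by_cases hc : (nB.length : Int) < x ∧ l ≤ x
    · rw [if_pos hc, if_pos hc]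
      have hfac : (if l - 1 < (nB.length : Int) then (PySem.List.pyGet? nB (l - 1)).getD 0 else 0)
          = (if l - 1 < (nB.length : Int) then lookB s steps (l - 1) else 0) := by
        by_cases h : l - 1 < (nB.length : Int)
        · rw [if_pos h, if_pos h]
          have h1 : ((l - 1).toNat : Int) = l - 1 := by omega
          have h2 : (l - 1).toNat < nB.length := by omega
          rw [PySem.List.pyGet?_of_nonneg nB (by omega), hinv _ h2, h1]
          rfl
        · rw [if_neg h, if_neg h]
      simp only [hfac]
      set f : Int := if l - 1 < (nB.length : Int) then lookB s steps (l - 1) else 0 with hf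
      by_cases hf1 : f > 1
      · have hlm : l ≤ (nB.length : Int) := by
          by_contra hcon
          rw [if_neg (by omega)] at hf
          omega
        rw [if_pos hf1]
        rw [PySem.List.slice_to nB (by omega), PySem.List.slice_from nB (by omega)]
        by_cases hlt : l < (nB.length : Int)
        · rw [if_pos ⟨hf1, hlt⟩]
          set L' := nB.take l.toNat ++ (List.replicate f.toNat (nB.drop l.toNat)).flatten with hL'
          have hlen : ((L'.length : Nat) : Int) = l + f * ((nB.length : Int) - l) := by
            have hb : ((nB.length - l.toNat : Nat) : Int) = (nB.length : Int) - l := by omega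
            have h1 : L'.length = l.toNat + f.toNat * (nB.length - l.toNat) := by
              rw [hL', List.length_append, List.length_take, List.length_flatten,
                List.map_replicate, List.length_drop, List.sum_replicate, smul_eq_mul,
                min_eq_left (by omega)]
            have h2 : ((f.toNat * (nB.length - l.toNat) : Nat) : Int) = f * ((nB.length : Int) - l) := by
              calc ((f.toNat * (nB.length - l.toNat) : Nat) : Int)
                  = (f.toNat : Int) * ((nB.length - l.toNat : Nat) : Int) := by push_cast; ring
                _ = f * ((nB.length : Int) - l) := by
                    rw [Int.toNat_of_nonneg (by omega : (0:Int) ≤ f), hb]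
            rw [h1, Nat.cast_add, h2, Int.toNat_of_nonneg (by omega : (0:Int) ≤ l)]
          have := ih (l + 1) (steps ++ [(l, (nB.length : Int), f)]) L'
            (by omega) (by omega) (step_invariant s steps l f nB hl hlt hinv)
          rw [hlen] at this
          exact this
        · -- l = len(nB): the block is empty, both sides loop on unchanged state
          have hle : l = (nB.length : Int) := by omega
          rw [if_neg (by omega)]
          have hL'eq : nB.take l.toNat ++ (List.replicate f.toNat (nB.drop l.toNat)).flatten = nB := by
            rw [List.take_of_length_le (by omega), List.drop_of_length_le (by omega)]
            simp
          rw [hL'eq]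
          exact ih (l + 1) steps nB (by omega) (by omega) hinv
      · rw [if_neg hf1, if_neg (by tauto)]
        exact ih (l + 1) steps nB (by omega) (by omega) hinv
    · rw [if_neg hc, if_neg hc]
      exact eq_map_range nB _ hinv

-- ===== VERDICT (by name: the statement is the Claim_ definition above) =====
theorem getdb_spec : Claim_equal_getdb := by
  intro s x _
  unfold Spec_getdb getdb getdb_alt
  obtain ⟨zs', hz', heq⟩ := loop_agree s x x.toNat 1 s
      (List.replicate (3 * x - (s.length : Int)).toNat 0) (by omega) le_rfl
      (fun z hz => List.eq_of_mem_replicate hz)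
  simp only [heq, PySem.List.slice_zero_start]
  rw [PySem.List.slice_to_natCast]
  simp only [List.take_left]
  have hinv0 : ∀ k : Nat, k < s.length → s[k]? = some (lookB s [] (k : Int)) := by
    intro k hk
    unfold lookB
    simp [List.foldr_nil, PySem.List.pyGet?_of_nonneg s (by omega : (0:Int) ≤ (k:Int)),
      List.getElem?_eq_getElem hk]
  rw [mid_alt s x x.toNat 1 [] s (by omega) le_rfl hinv0]
  rw [PySem.List.pyRange_one, List.map_map]
  simp only [Function.comp_def, sub_zero, zero_add]
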